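-- pv_equiv track=rewrite | github.com/tramebleue/python-topojson | topojson/delta.py | delta_decode
-- ===== SOURCE A (Python) =====
-- def delta_decode(delta_coords):
--
--     x, y = delta_coords[0]
--     coordinates = [[ x, y ]]
--
--     for dx, dy in delta_coords[1:]:
--         x = x + dx
--         y = y + dy
--         coordinates.append([ x, y ])
--
--     return coordinates
-- ===== SOURCE B (Python) =====
-- def _prefix_sums(start, deltas):
--     sums = [start]
--     for d in deltas:
--         sums.append(sums[-1] + d)
--     return sums
--
--
-- def delta_decode(delta_coords):
--     x0, y0 = delta_coords[0]
--     xs = _prefix_sums(x0, [c[0] for c in delta_coords[1:]])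
--     ys = _prefix_sums(y0, [c[1] for c in delta_coords[1:]])
--     return [[x, y] for x, y in zip(xs, ys)]
-- ===== Notes on version B (the rewrite author's own statement) =====
-- stated objective: alternative
-- what changed: Replaces the single coupled running-sum loop that appends [x,y] pairs with two independent prefix-sum sequences over the x-deltas and y-deltas, zipped back into pairs.
import Mathlib
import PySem

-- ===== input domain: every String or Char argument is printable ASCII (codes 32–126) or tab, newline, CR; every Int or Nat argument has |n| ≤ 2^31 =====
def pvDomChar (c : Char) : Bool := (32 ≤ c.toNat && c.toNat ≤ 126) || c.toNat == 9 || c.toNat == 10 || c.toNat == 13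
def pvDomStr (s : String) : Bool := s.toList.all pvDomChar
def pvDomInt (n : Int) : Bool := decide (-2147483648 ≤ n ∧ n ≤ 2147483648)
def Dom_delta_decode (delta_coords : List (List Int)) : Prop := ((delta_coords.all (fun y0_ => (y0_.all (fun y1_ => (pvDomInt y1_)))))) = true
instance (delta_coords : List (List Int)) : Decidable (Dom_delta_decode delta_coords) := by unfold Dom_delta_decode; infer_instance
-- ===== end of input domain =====

-- B decodes by two independent prefix-sum scans (x and y) zipped into pairs, instead of A's
-- single coupled running-sum loop; same O(n) cost, different decomposition.

-- ===== PORT A =====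
-- 'x, y = c' tuple unpacking: exact when c has exactly 2 entries; Python raises otherwise (excluded by Pre_)
def pvUnpack2 (c : List Int) : Int × Int :=
  match c with
  | [a, b] => (a, b)
  | _ => (0, 0)

def delta_decode (delta_coords : List (List Int)) : List (List Int) :=
  match delta_coords with
  | [] => []  -- delta_coords[0] raises IndexError in Python; excluded by Pre_
  | p :: rest =>
    let xy := pvUnpack2 p
    let st := rest.foldl
      (fun (s : Int × Int × List (List Int)) c =>
        let d := pvUnpack2 c
        let x := s.1 + d.1
        let y := s.2.1 + d.2
        (x, y, s.2.2 ++ [[x, y]]))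
      (xy.1, xy.2, [[xy.1, xy.2]])
    st.2.2

-- ===== PORT B =====
-- transliteration of Source B's _prefix_sums loop (appending a running total) as structural recursion
def pvPrefixSums (start : Int) : List Int → List Int
  | [] => [start]
  | d :: ds => start :: pvPrefixSums (start + d) ds

def delta_decode_alt (delta_coords : List (List Int)) : List (List Int) :=
  match delta_coords with
  | [] => []  -- delta_coords[0] raises IndexError in Python; excluded by Pre_
  | p :: rest =>
    let xy := pvUnpack2 p
    let xs := pvPrefixSums xy.1 (rest.map (fun c => c.getD 0 0))
    let ys := pvPrefixSums xy.2 (rest.map (fun c => c.getD 1 0))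
    List.zipWith (fun x y => [x, y]) xs ys

-- ===== PRECONDITION & SPEC =====
-- Pre_ excludes exactly the inputs where Python A raises: the empty list (IndexError on
-- delta_coords[0]) and any coordinate whose length is not 2 (ValueError on unpacking).
def Pre_delta_decode (delta_coords : List (List Int)) : Prop :=
  delta_coords ≠ [] ∧ ∀ c ∈ delta_coords, c.length = 2
instance (delta_coords : List (List Int)) : Decidable (Pre_delta_decode delta_coords) := by
  unfold Pre_delta_decode; infer_instance

def pvWitness_delta_decode : List (List Int) := [[1, 2], [3, 4], [-1, 0]]

def Spec_delta_decode (delta_coords : List (List Int)) (out : List (List Int)) : Prop := out = delta_decode_alt delta_coords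
instance (delta_coords : List (List Int)) (out : List (List Int)) : Decidable (Spec_delta_decode delta_coords out) := by unfold Spec_delta_decode; infer_instance

-- ===== CLAIM (what is proved, stated in full; the proofs are below) =====
def Claim_equal_delta_decode : Prop := ∀ (delta_coords : List (List Int)), Dom_delta_decode delta_coords → Pre_delta_decode delta_coords → Spec_delta_decode delta_coords (delta_decode delta_coords)

-- ===== LEMMAS AND PROOFS =====

lemma pvPrefixSums_head (start : Int) (l : List Int) :
    pvPrefixSums start l = start :: (pvPrefixSums start l).tail := by
  cases l <;> rfl

lemma pvUnpack2_eq_getD {c : List Int} (h : c.length = 2) :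
    pvUnpack2 c = (c.getD 0 0, c.getD 1 0) := by
  match c, h with
  | [a, b], _ => rfl

lemma delta_loop_eq (rest : List (List Int)) :
    ∀ (x y : Int) (acc : List (List Int)), (∀ c ∈ rest, c.length = 2) →
    (rest.foldl
      (fun (s : Int × Int × List (List Int)) c =>
        let d := pvUnpack2 c
        let x := s.1 + d.1
        let y := s.2.1 + d.2
        (x, y, s.2.2 ++ [[x, y]])) (x, y, acc)).2.2
    = acc ++ List.zipWith (fun a b => [a, b])
        (pvPrefixSums x (rest.map (fun c => c.getD 0 0))).tail
        (pvPrefixSums y (rest.map (fun c => c.getD 1 0))).tail := by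
  induction rest with
  | nil => intro x y acc _; simp [pvPrefixSums]
  | cons c rest ih =>
    intro x y acc h
    have hc := h c (List.mem_cons_self ..)
    have hrest : ∀ d ∈ rest, d.length = 2 := fun d hd => h d (List.mem_cons_of_mem _ hd)
    simp only [List.foldl_cons, List.map_cons, pvPrefixSums, List.tail_cons]
    rw [ih _ _ _ hrest, pvUnpack2_eq_getD hc]
    rw [pvPrefixSums_head (x + c.getD 0 0), pvPrefixSums_head (y + c.getD 1 0)]
    simp

theorem delta_decode_spec : Claim_equal_delta_decode := by
  intro delta_coords _ hpre
  unfold Spec_delta_decode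
  obtain ⟨hne, hall⟩ := hpre
  match delta_coords, hne with
  | p :: rest, _ =>
    have hrest : ∀ c ∈ rest, c.length = 2 := fun c hc => hall c (List.mem_cons_of_mem _ hc)
    unfold delta_decode delta_decode_alt
    simp only
    rw [delta_loop_eq rest _ _ _ hrest]
    rw [pvPrefixSums_head (pvUnpack2 p).1, pvPrefixSums_head (pvUnpack2 p).2]
    simp
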